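-- pv_equiv track=rewrite | github.com/ivardb/AdventOfCode2019 | python/day4.py | part1
-- ===== SOURCE A (Python) =====
-- def part1(numbers):
--     count = 0
--     for number in numbers:
--         n = str(number)
--         old = n[0]
--         increasing = True
--         same = False
--         for i in range(1,len(n)):
--             if n[i]<old:
--                 increasing=False
--                 break
--             if n[i] == old:
--                 same = True
--             old = n[i]
--         if same and increasing:
--             count += 1
--     return count
-- ===== SOURCE B (Python) =====
-- def part1(numbers):
--     return sum(
--         1 for s in map(str, numbers)
--         if sorted(s) == list(s) and len(set(s)) < len(s)
--     )
-- ===== Notes on version B (the rewrite author's own statement) =====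
-- stated objective: idiomatic
-- what changed: Replaces the hand-written pairwise scan with early break and two flags by a one-line generator: monotonicity via sorted(s) == list(s) and the adjacent repeat via len(set(s)) < len(s), relying on duplicates being adjacent in a non-decreasing string.
import Mathlib
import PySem

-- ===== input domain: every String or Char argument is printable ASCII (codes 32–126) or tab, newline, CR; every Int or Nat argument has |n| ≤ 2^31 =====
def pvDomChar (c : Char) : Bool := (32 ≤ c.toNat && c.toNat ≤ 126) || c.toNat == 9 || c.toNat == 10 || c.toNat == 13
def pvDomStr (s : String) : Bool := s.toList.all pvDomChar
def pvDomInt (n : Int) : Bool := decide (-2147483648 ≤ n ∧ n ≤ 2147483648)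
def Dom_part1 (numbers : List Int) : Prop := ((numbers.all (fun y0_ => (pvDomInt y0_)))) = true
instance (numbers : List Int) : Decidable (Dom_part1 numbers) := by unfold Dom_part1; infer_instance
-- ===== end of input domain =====

-- B replaces A's pairwise digit scan (early break, two flags) by the idiomatic check
-- sorted(s) == list(s) and len(set(s)) < len(s); equivalence proved, no speed claim.

-- ===== PORT A =====
-- inner 'for i in range(1, len(n))' loop with its break, over (increasing, same, old)
def part1Loop (old : Char) (increasing same : Bool) (rest : List Char) : Bool × Bool :=
  match rest with
  | [] => (increasing, same)
  | x :: xs =>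
    if x < old then (false, same)                 -- increasing = False; break
    else part1Loop x increasing (same || x == old) xs

def part1 (numbers : List Int) : Int :=
  numbers.foldl (fun count number =>
    match PySem.Int.toChars number with           -- n = str(number); old = n[0]
    | [] => count                                 -- unreachable: str(number) is never empty
    | old :: rest =>
      let p := part1Loop old true false rest
      if p.2 && p.1 then count + 1 else count) 0  -- if same and increasing: count += 1

-- ===== PORT B =====
def part1_alt (numbers : List Int) : Int :=
  numbers.foldl (fun acc number =>
    let s := PySem.Int.toChars number
    if (PySem.List.sorted s (fun c => c) == s)
        && (PySem.Set.len (PySem.Set.ofList s) < (s.length : Int))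
    then acc + 1 else acc) 0

-- ===== PRECONDITION & SPEC =====
def Spec_part1 (numbers : List Int) (out : Int) : Prop := out = part1_alt numbers
instance (numbers : List Int) (out : Int) : Decidable (Spec_part1 numbers out) := by unfold Spec_part1; infer_instance

-- ===== CLAIM (what is proved, stated in full; the proofs are below) =====
def Claim_equal_part1 : Prop := ∀ (numbers : List Int), Dom_part1 numbers → Spec_part1 numbers (part1 numbers)

-- ===== LEMMAS AND PROOFS =====

-- boolean chain (adjacent non-decreasing) and adjacent-equal tests, proof-side only
def chainB (old : Char) : List Char → Bool
  | [] => true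
  | x :: xs => decide (old ≤ x) && chainB x xs

def adjB (old : Char) : List Char → Bool
  | [] => false
  | x :: xs => (x == old) || adjB x xs

theorem part1Loop_char (rest : List Char) : ∀ (old : Char) (same : Bool),
    ((part1Loop old true same rest).2 && (part1Loop old true same rest).1)
      = (chainB old rest && (same || adjB old rest)) := by
  induction rest with
  | nil => intro old same; simp [part1Loop, chainB, adjB]
  | cons x xs ih =>
    intro old same
    by_cases h : x < old
    · have : ¬ old ≤ x := not_le.mpr h
      simp [part1Loop, chainB, h, this]
    · have hle : old ≤ x := not_lt.mp h
      simp only [part1Loop, if_neg h, chainB, adjB, decide_eq_true hle, Bool.true_and, ih]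
      cases same <;> cases hx : (x == old) <;> simp

theorem chainB_iff (rest : List Char) : ∀ old : Char,
    chainB old rest = true ↔ (old :: rest).Pairwise (· ≤ ·) := by
  induction rest with
  | nil => intro old; simp [chainB]
  | cons x xs ih =>
    intro old
    simp only [chainB, Bool.and_eq_true, decide_eq_true_eq, ih, List.pairwise_cons]
    constructor
    · rintro ⟨hox, hx, hxs⟩
      exact ⟨fun y hy => by
        rcases List.mem_cons.mp hy with hy | hy
        · exact hy ▸ hox
        · exact le_trans hox (hx y hy), hx, hxs⟩
    · rintro ⟨ho, hx, hxs⟩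
      exact ⟨ho x (by simp), hx, hxs⟩

theorem sorted_eq_iff (l : List Char) :
    (PySem.List.sorted l (fun c => c) = l) ↔ l.Pairwise (· ≤ ·) := by
  constructor
  · intro h
    have := PySem.List.sorted_pairwise l (fun c => c)
    rw [h] at this
    exact this
  · intro h
    exact PySem.List.sorted_eq_self_of_pairwise l (fun c => c) h

-- lengths: the dedup (= set) is strictly shorter iff the list has a duplicate
theorem card_lt_of_not_nodup (l : List Char) (h : ¬ l.Nodup) :
    l.toFinset.card < l.length := by
  induction l with
  | nil => exact absurd List.nodup_nil h
  | cons a t ih =>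
    by_cases hat : a ∈ t
    · calc (a :: t).toFinset.card = t.toFinset.card := by
            simp [List.toFinset_cons, Finset.insert_eq_self.mpr (List.mem_toFinset.mpr hat)]
        _ ≤ t.length := List.toFinset_card_le t
        _ < (a :: t).length := by simp
    · have hnt : ¬ t.Nodup := fun hn => h (List.nodup_cons.mpr ⟨hat, hn⟩)
      calc (a :: t).toFinset.card ≤ t.toFinset.card + 1 := by
            simp [List.toFinset_cons]
            exact Finset.card_insert_le a t.toFinset
        _ < t.length + 1 := by have := ih hnt; omega
        _ = (a :: t).length := by simp

theorem setlen_lt_iff (l : List Char) :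
    (PySem.Set.len (PySem.Set.ofList l) < (l.length : Int)) ↔ ¬ l.Nodup := by
  have hlen : PySem.Set.len (PySem.Set.ofList l) = ((PySem.Set.ofList l).length : Int) := rfl
  have hcard : (PySem.Set.ofList l).length = l.toFinset.card := by
    have hnd := PySem.Set.nodup_ofList l
    rw [← List.toFinset_card_of_nodup hnd]
    congr 1
    apply Finset.ext
    intro x
    simp [List.mem_toFinset, PySem.Set.mem_ofList]
  rw [hlen, hcard]
  constructor
  · intro h hnd
    rw [List.toFinset_card_of_nodup hnd] at h
    omega
  · intro h
    have := card_lt_of_not_nodup l h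
    omega

-- in a non-decreasing string, a duplicate exists iff an adjacent repeat exists
theorem adjB_iff_not_nodup (rest : List Char) : ∀ old : Char,
    (old :: rest).Pairwise (· ≤ ·) →
    (adjB old rest = true ↔ ¬ (old :: rest).Nodup) := by
  induction rest with
  | nil => intro old _; simp [adjB]
  | cons x xs ih =>
    intro old hpw
    have hpx : (x :: xs).Pairwise (· ≤ ·) := (List.pairwise_cons.mp hpw).2
    have hox : old ≤ x := (List.pairwise_cons.mp hpw).1 x (by simp)
    constructor
    · intro h
      simp only [adjB, Bool.or_eq_true, beq_iff_eq] at h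
      rcases h with h | h
      · intro hnd
        exact (List.nodup_cons.mp hnd).1 (by simp [h])
      · intro hnd
        exact ((ih x hpx).mp h) (List.nodup_cons.mp hnd).2
    · intro h
      by_contra hadj
      apply h
      simp only [adjB, Bool.or_eq_true, beq_iff_eq, not_or] at hadj
      obtain ⟨hxo, hrest⟩ := hadj
      have hlt : old < x := lt_of_le_of_ne hox (fun he => hxo he.symm)
      have hnd_tail : (x :: xs).Nodup := by
        by_contra hc
        exact hrest ((ih x hpx).mpr hc)
      refine List.nodup_cons.mpr ⟨?_, hnd_tail⟩
      intro hmem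
      rcases List.mem_cons.mp hmem with hmem | hmem
      · exact absurd hmem.symm (ne_of_lt hlt).symm
      · have : x ≤ old := by
          have := (List.pairwise_cons.mp hpx).1 old hmem
          exact this
        exact absurd hlt (not_lt.mpr this)

-- the per-number conditions agree
theorem step_eq (old : Char) (rest : List Char) :
    ((part1Loop old true false rest).2 && (part1Loop old true false rest).1)
      = ((PySem.List.sorted (old :: rest) (fun c => c) == old :: rest)
          && (PySem.Set.len (PySem.Set.ofList (old :: rest)) < (((old :: rest).length : Nat) : Int))) := by
  rw [part1Loop_char]
  by_cases hpw : (old :: rest).Pairwise (· ≤ ·)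
  · have h1 : chainB old rest = true := (chainB_iff rest old).mpr hpw
    have h2 : (PySem.List.sorted (old :: rest) (fun c => c) == old :: rest) = true := by
      simpa using (sorted_eq_iff (old :: rest)).mpr hpw
    rw [h1, h2]
    simp only [Bool.true_and, Bool.false_or]
    by_cases ha : adjB old rest = true
    · rw [ha]
      have := (setlen_lt_iff (old :: rest)).mpr ((adjB_iff_not_nodup rest old hpw).mp ha)
      exact (decide_eq_true this).symm
    · rw [Bool.not_eq_true] at ha
      rw [ha]
      have hnd : (old :: rest).Nodup := by
        by_contra hc
        exact absurd ((adjB_iff_not_nodup rest old hpw).mpr hc) (by simp [ha])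
      have : ¬ (PySem.Set.len (PySem.Set.ofList (old :: rest)) < (((old :: rest).length : Nat) : Int)) :=
        fun h => ((setlen_lt_iff (old :: rest)).mp h) hnd
      exact (decide_eq_false this).symm
  · have h1 : chainB old rest = false := by
      rw [← Bool.not_eq_true]
      exact fun h => hpw ((chainB_iff rest old).mp h)
    have h2 : (PySem.List.sorted (old :: rest) (fun c => c) == old :: rest) = false := by
      rw [beq_eq_false_iff_ne]
      exact fun h => hpw ((sorted_eq_iff (old :: rest)).mp h)
    rw [h1, h2]
    simp

theorem fold_eq (numbers : List Int) : ∀ acc : Int,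
    numbers.foldl (fun count number =>
      match PySem.Int.toChars number with
      | [] => count
      | old :: rest =>
        let p := part1Loop old true false rest
        if p.2 && p.1 then count + 1 else count) acc
    = numbers.foldl (fun acc number =>
        let s := PySem.Int.toChars number
        if (PySem.List.sorted s (fun c => c) == s)
            && (PySem.Set.len (PySem.Set.ofList s) < (s.length : Int))
        then acc + 1 else acc) acc := by
  induction numbers with
  | nil => intro acc; rfl
  | cons n ns ih =>
    intro acc
    simp only [List.foldl_cons]
    rw [ih]
    congr 1
    cases hs : PySem.Int.toChars n with
    | nil => simp
    | cons old rest => simp only [step_eq old rest]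

-- ===== VERDICT (by name: the statement is the Claim_ definition above) =====
theorem part1_spec : Claim_equal_part1 := by
  intro numbers _
  unfold Spec_part1 part1 part1_alt
  exact fold_eq numbers 0
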